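-- pv_equiv track=rewrite | github.com/kevinnbass/TestMaster | organized_codebase/testing/exhaustive_stub_analysis.py | categorize_and_prioritize
-- ===== SOURCE A (Python) =====
-- from typing import Dict, List, Set, Tuple
--
-- def categorize_and_prioritize(all_issues: Dict[str, Dict[str, List[str]]]) -> Dict[str, List[Tuple[str, Dict, int]]]:
--     """Categorize files by priority and issue severity."""
--
--     critical_files = []
--     important_files = []
--     minor_files = []
--
--     for file_path, issues in all_issues.items():
--         issue_count = sum(len(issue_list) for issue_list in issues.values())
--
--         # Calculate severity score
--         severity = 0
--         severity += len(issues.get('unimplemented_methods', [])) * 10  # High priority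
--         severity += len(issues.get('placeholder_methods', [])) * 8
--         severity += len(issues.get('pass_statements', [])) * 6
--         severity += len(issues.get('empty_returns', [])) * 4
--         severity += len(issues.get('minimal_implementations', [])) * 3
--         severity += len(issues.get('todo_comments', [])) * 2
--         severity += len(issues.get('stub_implementations', [])) * 5
--
--         # Prioritize by location and severity
--         if 'core/' in file_path or 'integration/' in file_path:
--             if severity > 20:
--                 critical_files.append((file_path, issues, severity))
--             elif severity > 5:
--                 important_files.append((file_path, issues, severity))
--             else:
--                 minor_files.append((file_path, issues, severity))
--         elif 'agents/' in file_path or 'dashboard/' in file_path: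
--             if severity > 15:
--                 important_files.append((file_path, issues, severity))
--             else:
--                 minor_files.append((file_path, issues, severity))
--         else:
--             minor_files.append((file_path, issues, severity))
--
--     # Sort by severity
--     critical_files.sort(key=lambda x: x[2], reverse=True)
--     important_files.sort(key=lambda x: x[2], reverse=True)
--     minor_files.sort(key=lambda x: x[2], reverse=True)
--
--     return {
--         'critical': critical_files,
--         'important': important_files,
--         'minor': minor_files
--     }
-- ===== SOURCE B (Python) =====
-- WEIGHTS = (
--     ('unimplemented_methods', 10),
--     ('placeholder_methods', 8),
--     ('pass_statements', 6),
--     ('empty_returns', 4),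
--     ('minimal_implementations', 3),
--     ('todo_comments', 2),
--     ('stub_implementations', 5),
-- )
--
-- def _severity(issues):
--     return sum(len(issues.get(key, [])) * w for key, w in WEIGHTS)
--
-- def _insort(bucket, t):
--     # stable descending insertion: place t before the first strictly
--     # smaller severity (so ties keep insertion order)
--     for i, y in enumerate(bucket):
--         if y[2] < t[2]:
--             bucket.insert(i, t)
--             return
--     bucket.append(t)
--
-- def categorize_and_prioritize(all_issues):
--     # Online algorithm: the three buckets are kept sorted at all times by
--     # insertion; no sort call is ever made after the single pass.
--     buckets = {'critical': [], 'important': [], 'minor': []}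
--     for file_path, issues in all_issues.items():
--         severity = _severity(issues)
--         if 'core/' in file_path or 'integration/' in file_path:
--             name = 'critical' if severity > 20 else ('important' if severity > 5 else 'minor')
--         elif 'agents/' in file_path or 'dashboard/' in file_path:
--             name = 'important' if severity > 15 else 'minor'
--         else:
--             name = 'minor'
--         _insort(buckets[name], (file_path, issues, severity))
--     return buckets
-- ===== Notes on version B (the rewrite author's own statement) =====
-- stated objective: alternative
-- what changed: B is an online insertion-sort: one pass computes each file's severity, selects its bucket name, and inserts the triple into that bucket at its stable descending position, so the three buckets are sorted at all times and A's three post-hoc sort calls disappear.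
import Mathlib
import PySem

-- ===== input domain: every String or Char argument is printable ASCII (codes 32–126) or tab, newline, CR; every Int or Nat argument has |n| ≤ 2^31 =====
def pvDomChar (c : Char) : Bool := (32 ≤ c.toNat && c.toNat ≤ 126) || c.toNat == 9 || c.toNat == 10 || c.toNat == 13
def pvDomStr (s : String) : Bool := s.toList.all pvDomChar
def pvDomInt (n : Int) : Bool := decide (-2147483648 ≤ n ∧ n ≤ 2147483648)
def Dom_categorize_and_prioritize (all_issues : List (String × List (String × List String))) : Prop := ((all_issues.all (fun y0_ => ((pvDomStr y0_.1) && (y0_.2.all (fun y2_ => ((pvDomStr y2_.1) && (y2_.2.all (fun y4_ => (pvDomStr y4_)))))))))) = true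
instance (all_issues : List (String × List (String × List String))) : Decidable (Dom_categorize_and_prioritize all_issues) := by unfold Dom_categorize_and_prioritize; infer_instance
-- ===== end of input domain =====

-- B replaces A's partition-then-sort-three-buckets with an online insertion sort:
-- one pass inserts each (path, issues, severity) triple into its bucket at its
-- stable descending position, so no sort call is ever made; same return value.

-- ===== PORT A =====
-- one step of A's for-loop: state = (critical_files, important_files, minor_files)
def pvStepA (st : List (String × (List (String × List String)) × Int) × List (String × (List (String × List String)) × Int) × List (String × (List (String × List String)) × Int))
    (fi : String × List (String × List String)) :
    List (String × (List (String × List String)) × Int) × List (String × (List (String × List String)) × Int) × List (String × (List (String × List String)) × Int) :=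
  let file_path := fi.1
  let issues := fi.2
  let _issue_count : Int := (issues.map (fun kv => ((kv.2.length : Int)))).sum
  let severity : Int := 0
  let severity := severity + ((PySem.Dict.getD ⟨issues⟩ "unimplemented_methods" []).length : Int) * 10
  let severity := severity + ((PySem.Dict.getD ⟨issues⟩ "placeholder_methods" []).length : Int) * 8
  let severity := severity + ((PySem.Dict.getD ⟨issues⟩ "pass_statements" []).length : Int) * 6
  let severity := severity + ((PySem.Dict.getD ⟨issues⟩ "empty_returns" []).length : Int) * 4
  let severity := severity + ((PySem.Dict.getD ⟨issues⟩ "minimal_implementations" []).length : Int) * 3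
  let severity := severity + ((PySem.Dict.getD ⟨issues⟩ "todo_comments" []).length : Int) * 2
  let severity := severity + ((PySem.Dict.getD ⟨issues⟩ "stub_implementations" []).length : Int) * 5
  if PySem.Str.isIn "core/" file_path || PySem.Str.isIn "integration/" file_path then
    if severity > 20 then (st.1 ++ [(file_path, issues, severity)], st.2.1, st.2.2)
    else if severity > 5 then (st.1, st.2.1 ++ [(file_path, issues, severity)], st.2.2)
    else (st.1, st.2.1, st.2.2 ++ [(file_path, issues, severity)])
  else if PySem.Str.isIn "agents/" file_path || PySem.Str.isIn "dashboard/" file_path then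
    if severity > 15 then (st.1, st.2.1 ++ [(file_path, issues, severity)], st.2.2)
    else (st.1, st.2.1, st.2.2 ++ [(file_path, issues, severity)])
  else (st.1, st.2.1, st.2.2 ++ [(file_path, issues, severity)])

def categorize_and_prioritize (all_issues : List (String × List (String × List String))) : List (String × List (String × (List (String × List String)) × Int)) :=
  let st := all_issues.foldl pvStepA ([], [], [])
  [("critical", PySem.List.sorted st.1 (fun x => x.2.2) true),
   ("important", PySem.List.sorted st.2.1 (fun x => x.2.2) true),
   ("minor", PySem.List.sorted st.2.2 (fun x => x.2.2) true)]

-- ===== PORT B =====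
def pvWeights : List (String × Int) :=
  [("unimplemented_methods", 10), ("placeholder_methods", 8), ("pass_statements", 6),
   ("empty_returns", 4), ("minimal_implementations", 3), ("todo_comments", 2),
   ("stub_implementations", 5)]

def pvSeverityB (issues : List (String × List String)) : Int :=
  (pvWeights.map (fun kw => ((PySem.Dict.getD ⟨issues⟩ kw.1 []).length : Int) * kw.2)).sum

-- Source B's _insort: insert before the first element with strictly smaller severity
def pvInsortB (bucket : List (String × (List (String × List String)) × Int))
    (t : String × (List (String × List String)) × Int) :
    List (String × (List (String × List String)) × Int) :=
  PySem.List.insertBy (fun a b => decide (b.2.2 < a.2.2)) t bucket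

-- one step of B's single pass: severity, bucket name, stable descending insertion
def pvStepB (st : List (String × (List (String × List String)) × Int) × List (String × (List (String × List String)) × Int) × List (String × (List (String × List String)) × Int))
    (fi : String × List (String × List String)) :
    List (String × (List (String × List String)) × Int) × List (String × (List (String × List String)) × Int) × List (String × (List (String × List String)) × Int) :=
  let severity := pvSeverityB fi.2
  let name :=
    if PySem.Str.isIn "core/" fi.1 || PySem.Str.isIn "integration/" fi.1 then
      if severity > 20 then "critical" else if severity > 5 then "important" else "minor"
    else if PySem.Str.isIn "agents/" fi.1 || PySem.Str.isIn "dashboard/" fi.1 then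
      if severity > 15 then "important" else "minor"
    else "minor"
  let t := (fi.1, fi.2, severity)
  if name = "critical" then (pvInsortB st.1 t, st.2.1, st.2.2)
  else if name = "important" then (st.1, pvInsortB st.2.1 t, st.2.2)
  else (st.1, st.2.1, pvInsortB st.2.2 t)

def categorize_and_prioritize_alt (all_issues : List (String × List (String × List String))) : List (String × List (String × (List (String × List String)) × Int)) :=
  let st := all_issues.foldl pvStepB ([], [], [])
  [("critical", st.1), ("important", st.2.1), ("minor", st.2.2)]

-- ===== PRECONDITION & SPEC =====
def Spec_categorize_and_prioritize (all_issues : List (String × List (String × List String))) (out : List (String × List (String × (List (String × List String)) × Int))) : Prop := out = categorize_and_prioritize_alt all_issues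
instance (all_issues : List (String × List (String × List String))) (out : List (String × List (String × (List (String × List String)) × Int))) : Decidable (Spec_categorize_and_prioritize all_issues out) := by
  unfold Spec_categorize_and_prioritize
  -- built stepwise: default instance search gives up on the deeply nested type
  letI d0 : DecidableEq (String × (List (String × List String)) × Int) := fun a b => instDecidableEqProd a b
  letI d1 : DecidableEq (List (String × (List (String × List String)) × Int)) := fun a b => instDecidableEqList a b
  letI d2 : DecidableEq (String × List (String × (List (String × List String)) × Int)) := fun a b => instDecidableEqProd a b
  letI d3 : DecidableEq (List (String × List (String × (List (String × List String)) × Int))) := fun a b => instDecidableEqList a b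
  exact d3 out (categorize_and_prioritize_alt all_issues)

-- ===== CLAIM (what is proved, stated in full; the proofs are below) =====
def Claim_equal_categorize_and_prioritize : Prop := ∀ (all_issues : List (String × List (String × List String))), Dom_categorize_and_prioritize all_issues → Spec_categorize_and_prioritize all_issues (categorize_and_prioritize all_issues)

-- ===== LEMMAS AND PROOFS =====

-- the triple B builds for an input pair
def pvTriple (fi : String × List (String × List String)) : String × (List (String × List String)) × Int :=
  (fi.1, fi.2, pvSeverityB fi.2)

-- the three bucket predicates, on triples
def pvCritP (t : String × (List (String × List String)) × Int) : Bool :=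
  (PySem.Str.isIn "core/" t.1 || PySem.Str.isIn "integration/" t.1) && decide (t.2.2 > 20)
def pvImpP (t : String × (List (String × List String)) × Int) : Bool :=
  ((PySem.Str.isIn "core/" t.1 || PySem.Str.isIn "integration/" t.1) && !decide (t.2.2 > 20) && decide (t.2.2 > 5))
  || (!(PySem.Str.isIn "core/" t.1 || PySem.Str.isIn "integration/" t.1)
      && (PySem.Str.isIn "agents/" t.1 || PySem.Str.isIn "dashboard/" t.1) && decide (t.2.2 > 15))
def pvMinP (t : String × (List (String × List String)) × Int) : Bool := !pvCritP t && !pvImpP t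

lemma pvSev_eq (issues : List (String × List String)) :
    pvSeverityB issues =
      0 + ((PySem.Dict.getD ⟨issues⟩ "unimplemented_methods" []).length : Int) * 10
        + ((PySem.Dict.getD ⟨issues⟩ "placeholder_methods" []).length : Int) * 8
        + ((PySem.Dict.getD ⟨issues⟩ "pass_statements" []).length : Int) * 6
        + ((PySem.Dict.getD ⟨issues⟩ "empty_returns" []).length : Int) * 4
        + ((PySem.Dict.getD ⟨issues⟩ "minimal_implementations" []).length : Int) * 3
        + ((PySem.Dict.getD ⟨issues⟩ "todo_comments" []).length : Int) * 2
        + ((PySem.Dict.getD ⟨issues⟩ "stub_implementations" []).length : Int) * 5 := by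
  simp [pvSeverityB, pvWeights]; ring

-- A's step, written with the three predicates
lemma pvStepA_eq (st : List (String × (List (String × List String)) × Int) × List (String × (List (String × List String)) × Int) × List (String × (List (String × List String)) × Int))
    (fi : String × List (String × List String)) :
    pvStepA st fi =
      (if pvCritP (pvTriple fi) then st.1 ++ [pvTriple fi] else st.1,
       if pvImpP (pvTriple fi) then st.2.1 ++ [pvTriple fi] else st.2.1,
       if pvMinP (pvTriple fi) then st.2.2 ++ [pvTriple fi] else st.2.2) := by
  simp only [pvStepA, pvTriple, pvCritP, pvImpP, pvMinP, ← pvSev_eq fi.2]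
  split_ifs <;> simp_all <;> try omega
  all_goals (rcases ‹_ ∨ _› with h | h <;> simp_all <;> omega)

-- B's step, written with the three predicates
lemma pvStepB_eq (st : List (String × (List (String × List String)) × Int) × List (String × (List (String × List String)) × Int) × List (String × (List (String × List String)) × Int))
    (fi : String × List (String × List String)) :
    pvStepB st fi =
      (if pvCritP (pvTriple fi) then pvInsortB st.1 (pvTriple fi) else st.1,
       if pvImpP (pvTriple fi) then pvInsortB st.2.1 (pvTriple fi) else st.2.1,
       if pvMinP (pvTriple fi) then pvInsortB st.2.2 (pvTriple fi) else st.2.2) := by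
  simp only [pvStepB, pvTriple, pvCritP, pvImpP, pvMinP]
  split_ifs <;> simp_all <;> try omega
  all_goals (rcases ‹_ ∨ _› with h | h <;> simp_all <;> omega)

-- A's loop = three filters of the triple list
lemma pvLoopA_spec (l : List (String × List (String × List String)))
    (c i m : List (String × (List (String × List String)) × Int)) :
    l.foldl pvStepA (c, i, m) =
      (c ++ (l.map pvTriple).filter pvCritP,
       i ++ (l.map pvTriple).filter pvImpP,
       m ++ (l.map pvTriple).filter pvMinP) := by
  induction l generalizing c i m with
  | nil => simp
  | cons fi rest ih =>
    rw [List.foldl_cons, pvStepA_eq, ih]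
    simp only [List.map_cons, List.filter_cons]
    by_cases h1 : pvCritP (pvTriple fi) <;> by_cases h2 : pvImpP (pvTriple fi) <;>
      simp [h1, h2, pvMinP]

-- inserting a filtered-in element commutes with the descending stable sort
lemma pvInsort_sorted (s : List (String × (List (String × List String)) × Int))
    (t : String × (List (String × List String)) × Int) :
    pvInsortB (PySem.List.sorted s (fun x => x.2.2) true) t =
      PySem.List.sorted (s ++ [t]) (fun x => x.2.2) true := by
  rw [PySem.List.sorted_rev_eq_foldl_insertBy (s ++ [t]), List.foldl_append,
      List.foldl_cons, List.foldl_nil, ← PySem.List.sorted_rev_eq_foldl_insertBy]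
  rfl

-- B's loop maintains the three buckets as the sorted filters of the triples seen
lemma pvLoopB_spec (l : List (String × List (String × List String))) :
    l.foldl pvStepB ([], [], []) =
      (PySem.List.sorted ((l.map pvTriple).filter pvCritP) (fun x => x.2.2) true,
       PySem.List.sorted ((l.map pvTriple).filter pvImpP) (fun x => x.2.2) true,
       PySem.List.sorted ((l.map pvTriple).filter pvMinP) (fun x => x.2.2) true) := by
  induction l using List.reverseRecOn with
  | nil => simp [PySem.List.sorted]
  | append_singleton l fi ih =>
    rw [List.foldl_append, List.foldl_cons, List.foldl_nil, ih, pvStepB_eq]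
    simp only [List.map_append, List.map_cons, List.map_nil, List.filter_append,
      List.filter_cons, List.filter_nil]
    by_cases h1 : pvCritP (pvTriple fi) <;> by_cases h2 : pvImpP (pvTriple fi) <;>
      simp [h1, h2, pvMinP, pvInsort_sorted]

-- ===== VERDICT (by name: the statement is the Claim_ definition above) =====
theorem categorize_and_prioritize_spec : Claim_equal_categorize_and_prioritize := by
  intro all_issues _
  show _ = _
  unfold categorize_and_prioritize categorize_and_prioritize_alt
  rw [pvLoopA_spec, pvLoopB_spec]
  simp
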